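-- pv_equiv track=rewrite | github.com/vickscosta/pythons | king/king(old).py | calcula_maior_carta_copas
-- ===== SOURCE A (Python) =====
-- lista_copas=[('AC',14,'C'),('2C',2,'C'),('3C',3,'C'),('4C',4,'C'),('5C',5,'C'),('6C',6,'C'),('7C',7,'C'),('8C',8,'C'),('9C',9,'C'),('10C',10,'C'),('VC',11,'C'),('DC',12,'C'),('KC',13,'C')]
--
-- def calcula_maior_carta(cartas):
--
--     maior_carta=cartas[0]
--     for carta in cartas:
--         if carta[1]>=maior_carta[1]:
--             maior_carta=carta
--
--     return maior_carta
--
-- def calcula_maior_carta_copas(cartas):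
--
--     cartas_copas=[]
--     for carta in cartas:
--         if carta in lista_copas:
--             cartas_copas.append(carta)
--
--     if len(cartas_copas)>0:
--         maior_carta=cartas_copas[0]
--         for carta in cartas_copas:
--             if carta[1]>=maior_carta[1]:
--                 maior_carta=carta
--
--     else:
--         maior_carta=calcula_maior_carta(cartas)
--
--     return maior_carta
-- ===== SOURCE B (Python) =====
-- lista_copas=[('AC',14,'C'),('2C',2,'C'),('3C',3,'C'),('4C',4,'C'),('5C',5,'C'),('6C',6,'C'),('7C',7,'C'),('8C',8,'C'),('9C',9,'C'),('10C',10,'C'),('VC',11,'C'),('DC',12,'C'),('KC',13,'C')]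
--
-- def calcula_maior_carta_copas(cartas):
--     maior_geral = cartas[0]
--     maior_copas = None
--     for carta in cartas:
--         if carta[1] >= maior_geral[1]:
--             maior_geral = carta
--         if carta in lista_copas and (maior_copas is None or carta[1] >= maior_copas[1]):
--             maior_copas = carta
--     return maior_copas if maior_copas is not None else maior_geral
-- ===== Notes on version B (the rewrite author's own statement) =====
-- stated objective: alternative
-- what changed: Replaced A's build-a-filtered-list plus two separate last-wins max scans by one fused pass over cartas maintaining two running bests (overall and hearts-only), choosing the hearts best if any hearts card was seen.
-- outside the precondition, e.g. on calcula_maior_carta_copas([]): A raises IndexError, B raises IndexError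
import Mathlib
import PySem

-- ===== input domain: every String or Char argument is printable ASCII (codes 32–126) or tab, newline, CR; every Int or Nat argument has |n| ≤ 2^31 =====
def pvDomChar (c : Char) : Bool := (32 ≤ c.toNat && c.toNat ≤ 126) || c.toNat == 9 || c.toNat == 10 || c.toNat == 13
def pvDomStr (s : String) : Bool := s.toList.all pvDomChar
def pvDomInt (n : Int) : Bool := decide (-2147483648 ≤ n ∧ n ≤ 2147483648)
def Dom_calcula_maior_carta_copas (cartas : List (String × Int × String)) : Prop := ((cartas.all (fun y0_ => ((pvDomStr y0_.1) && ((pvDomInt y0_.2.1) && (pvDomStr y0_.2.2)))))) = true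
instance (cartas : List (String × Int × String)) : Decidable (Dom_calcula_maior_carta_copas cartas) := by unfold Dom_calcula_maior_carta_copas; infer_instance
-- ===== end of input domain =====

-- ===== PORT A =====
-- header: B fuses A's filter pass and two max scans into one pass with two accumulators (alternative decomposition; same return values).
def lista_copas : List (String × Int × String) :=
  [("AC",14,"C"),("2C",2,"C"),("3C",3,"C"),("4C",4,"C"),("5C",5,"C"),("6C",6,"C"),("7C",7,"C"),("8C",8,"C"),("9C",9,"C"),("10C",10,"C"),("VC",11,"C"),("DC",12,"C"),("KC",13,"C")]

-- literal port of A's calcula_maior_carta; on [] Python raises IndexError (excluded by Pre_)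
def calcula_maior_carta (cartas : List (String × Int × String)) : String × Int × String :=
  match cartas with
  | [] => ("", 0, "")
  | c0 :: _ => cartas.foldl (fun m c => if c.2.1 ≥ m.2.1 then c else m) c0

def calcula_maior_carta_copas (cartas : List (String × Int × String)) : String × Int × String :=
  let cartas_copas := cartas.foldl (fun acc c => if c ∈ lista_copas then acc ++ [c] else acc) []
  match cartas_copas with
  | [] => calcula_maior_carta cartas
  | c0 :: _ => cartas_copas.foldl (fun m c => if c.2.1 ≥ m.2.1 then c else m) c0

-- ===== PORT B =====
def calcula_maior_carta_copas_alt (cartas : List (String × Int × String)) : String × Int × String :=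
  match cartas with
  | [] => ("", 0, "")  -- Python raises IndexError here (cartas[0]); excluded by Pre_
  | c0 :: _ =>
    let final := cartas.foldl
      (fun (s : (String × Int × String) × Option (String × Int × String)) c =>
        let g := if c.2.1 ≥ s.1.2.1 then c else s.1
        let k := if c ∈ lista_copas then
                   match s.2 with
                   | none => some c
                   | some m => if c.2.1 ≥ m.2.1 then some c else some m
                 else s.2
        (g, k)) (c0, none)
    match final.2 with
    | some m => m
    | none => final.1

-- ===== PRECONDITION & SPEC =====
-- Pre_: Python A raises IndexError on the empty list (cartas[0]); it returns on every other input.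
def Pre_calcula_maior_carta_copas (cartas : List (String × Int × String)) : Prop := cartas ≠ []
instance (cartas : List (String × Int × String)) : Decidable (Pre_calcula_maior_carta_copas cartas) := by unfold Pre_calcula_maior_carta_copas; infer_instance
def pvWitness_calcula_maior_carta_copas : (List (String × Int × String)) := [("2C", 2, "C"), ("xx", 5, "E")]
def Spec_calcula_maior_carta_copas (cartas : List (String × Int × String)) (out : String × Int × String) : Prop := out = calcula_maior_carta_copas_alt cartas
instance (cartas : List (String × Int × String)) (out : String × Int × String) : Decidable (Spec_calcula_maior_carta_copas cartas out) := by unfold Spec_calcula_maior_carta_copas; infer_instance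

-- ===== CLAIM (what is proved, stated in full; the proofs are below) =====
def Claim_equal_calcula_maior_carta_copas : Prop := ∀ (cartas : List (String × Int × String)), Dom_calcula_maior_carta_copas cartas → Pre_calcula_maior_carta_copas cartas → Spec_calcula_maior_carta_copas cartas (calcula_maior_carta_copas cartas)

-- ===== LEMMAS AND PROOFS =====
-- A's filter loop builds acc ++ filter
theorem pv_filter_loop (l : List (String × Int × String)) (acc : List (String × Int × String)) :
    l.foldl (fun acc c => if c ∈ lista_copas then acc ++ [c] else acc) acc
      = acc ++ l.filter (fun c => c ∈ lista_copas) := by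
  induction l generalizing acc with
  | nil => simp
  | cons h t ih =>
    simp only [List.foldl_cons, List.filter_cons]
    by_cases hm : h ∈ lista_copas <;> simp [hm, ih]

-- B's fused loop = (overall fold, option-fold over the filtered list)
theorem pv_fused (l : List (String × Int × String)) (g : String × Int × String)
    (k : Option (String × Int × String)) :
    l.foldl
      (fun (s : (String × Int × String) × Option (String × Int × String)) c =>
        let g := if c.2.1 ≥ s.1.2.1 then c else s.1
        let k := if c ∈ lista_copas then
                   match s.2 with
                   | none => some c
                   | some m => if c.2.1 ≥ m.2.1 then some c else some m
                 else s.2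
        (g, k)) (g, k)
      = (l.foldl (fun m c => if c.2.1 ≥ m.2.1 then c else m) g,
         (l.filter (fun c => c ∈ lista_copas)).foldl
           (fun o c => match o with
             | none => some c
             | some m => some (if c.2.1 ≥ m.2.1 then c else m)) k) := by
  induction l generalizing g k with
  | nil => rfl
  | cons h t ih =>
    simp only [List.foldl_cons, List.filter_cons]
    rw [ih]
    by_cases hm : h ∈ lista_copas
    · simp only [hm, decide_true, if_true, List.foldl_cons]
      cases k with
      | none => rfl
      | some m => dsimp only; split_ifs <;> rfl
    · simp [hm]

-- the option fold starting at some m is the plain fold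
theorem pv_optfold_some (l : List (String × Int × String)) (m : String × Int × String) :
    l.foldl (fun o c => match o with
      | none => some c
      | some m => some (if c.2.1 ≥ m.2.1 then c else m)) (some m)
      = some (l.foldl (fun m c => if c.2.1 ≥ m.2.1 then c else m) m) := by
  induction l generalizing m with
  | nil => rfl
  | cons h t ih => simp only [List.foldl_cons, ih]

-- ===== VERDICT (by name: the statement is the Claim_ definition above) =====
theorem calcula_maior_carta_copas_spec : Claim_equal_calcula_maior_carta_copas := by
  intro cartas _ hpre
  obtain ⟨c0, rest, rfl⟩ : ∃ c0 rest, cartas = c0 :: rest := by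
    cases cartas with
    | nil => exact absurd rfl hpre
    | cons c0 rest => exact ⟨c0, rest, rfl⟩
  show calcula_maior_carta_copas _ = calcula_maior_carta_copas_alt _
  unfold calcula_maior_carta_copas calcula_maior_carta_copas_alt
  simp only [pv_filter_loop, List.nil_append, pv_fused]
  cases hf : (c0 :: rest).filter (fun c => c ∈ lista_copas) with
  | nil =>
    simp [calcula_maior_carta, ite_self]
  | cons d0 ds =>
    simp [pv_optfold_some, ite_self]
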